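-- pv_equiv track=rewrite | github.com/brendan721/Flipsync_Final | fs_agt_clean/agents/conversational/intent_recognizer.py | _are_related_intents
-- ===== SOURCE A (Python) =====
-- def _are_related_intents(intent1: str, intent2: str) -> bool:
--     """Check if two intents are related."""
--     related_groups = [
--         ["product_search", "price_inquiry", "listing_management"],
--         ["inventory_check", "analytics_request"],
--         ["help_support", "account_management"],
--     ]
--
--     for group in related_groups:
--         if intent1 in group and intent2 in group:
--             return True
--
--     return False
-- ===== SOURCE B (Python) =====
-- def _are_related_intents(intent1: str, intent2: str) -> bool:
--     """Check if two intents are related."""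
--     related_groups = [
--         ["product_search", "price_inquiry", "listing_management"],
--         ["inventory_check", "analytics_request"],
--         ["help_support", "account_management"],
--     ]
--     intent_to_group = {
--         intent: idx
--         for idx, group in enumerate(related_groups)
--         for intent in group
--     }
--     g1 = intent_to_group.get(intent1)
--     g2 = intent_to_group.get(intent2)
--     return g1 is not None and g1 == g2
-- ===== Notes on version B (the rewrite author's own statement) =====
-- stated objective: idiomatic
-- what changed: B builds an intent-to-group-index dict once and compares two direct lookups (with a None guard), instead of A's per-group membership scans inside a loop.
import Mathlib
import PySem

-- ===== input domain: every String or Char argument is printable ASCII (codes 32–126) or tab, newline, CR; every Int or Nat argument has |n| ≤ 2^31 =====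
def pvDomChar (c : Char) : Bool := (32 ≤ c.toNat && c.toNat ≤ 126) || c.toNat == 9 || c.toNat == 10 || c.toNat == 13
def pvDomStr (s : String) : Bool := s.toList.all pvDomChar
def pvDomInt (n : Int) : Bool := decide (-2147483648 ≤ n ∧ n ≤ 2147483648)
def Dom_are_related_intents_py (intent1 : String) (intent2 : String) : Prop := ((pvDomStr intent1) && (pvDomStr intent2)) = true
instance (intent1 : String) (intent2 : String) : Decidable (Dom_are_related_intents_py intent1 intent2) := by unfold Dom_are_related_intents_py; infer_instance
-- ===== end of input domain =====

-- ===== PORT A =====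
-- B is idiomatic: one dict build + two lookups instead of per-group membership scans (return value only).
def pvRelatedGroups : List (List String) :=
  [["product_search", "price_inquiry", "listing_management"],
   ["inventory_check", "analytics_request"],
   ["help_support", "account_management"]]

-- 'for group in related_groups: if intent1 in group and intent2 in group: return True / return False'
def pvLoopA (intent1 : String) (intent2 : String) : List (List String) → Bool
  | [] => false
  | g :: rest =>
      if g.contains intent1 && g.contains intent2 then true
      else pvLoopA intent1 intent2 rest

def are_related_intents_py (intent1 : String) (intent2 : String) : Bool :=
  pvLoopA intent1 intent2 pvRelatedGroups

-- ===== PORT B =====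
-- {intent: idx for idx, group in enumerate(related_groups) for intent in group}
def pvIntentToGroup : PySem.Dict String Int :=
  (PySem.List.enumerate pvRelatedGroups).foldl
    (fun d p => p.2.foldl (fun d' intent => d'.insert intent p.1) d)
    PySem.Dict.empty

def are_related_intents_py_alt (intent1 : String) (intent2 : String) : Bool :=
  match pvIntentToGroup.get? intent1, pvIntentToGroup.get? intent2 with
  | some g1, some g2 => g1 == g2
  | _, _ => false

-- ===== PRECONDITION & SPEC =====
def Spec_are_related_intents_py (intent1 : String) (intent2 : String) (out : Bool) : Prop := out = are_related_intents_py_alt intent1 intent2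
instance (intent1 : String) (intent2 : String) (out : Bool) : Decidable (Spec_are_related_intents_py intent1 intent2 out) := by unfold Spec_are_related_intents_py; infer_instance

-- ===== CLAIM (what is proved, stated in full; the proofs are below) =====
def Claim_equal_are_related_intents_py : Prop := ∀ (intent1 : String) (intent2 : String), Dom_are_related_intents_py intent1 intent2 → Spec_are_related_intents_py intent1 intent2 (are_related_intents_py intent1 intent2)

-- ===== LEMMAS AND PROOFS =====

-- the dict B builds, as a literal (proof-side only)
def pvDLit : PySem.Dict String Int := PySem.Dict.mk
  [("product_search", 0), ("price_inquiry", 0), ("listing_management", 0),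
   ("inventory_check", 1), ("analytics_request", 1),
   ("help_support", 2), ("account_management", 2)]

theorem pvIntentToGroup_eq : pvIntentToGroup = pvDLit := by
  simp [pvIntentToGroup, pvRelatedGroups, pvDLit, PySem.List.enumerate_cons,
    PySem.List.enumerate_nil, PySem.Dict.insert, PySem.Dict.empty, PySem.Dict.contains,
    List.foldl]

-- membership in each group coincides with a lookup hitting that group's index
theorem pvMem1 (s : String) :
    (["product_search", "price_inquiry", "listing_management"] : List String).contains s
      = (pvDLit.get? s == some 0) := by
  simp only [pvDLit, List.contains_cons, List.contains_nil, PySem.Dict.get?_mk_cons]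
  split_ifs <;> simp_all [PySem.Dict.get?, @eq_comm String]

theorem pvMem2 (s : String) :
    (["inventory_check", "analytics_request"] : List String).contains s
      = (pvDLit.get? s == some 1) := by
  simp only [pvDLit, List.contains_cons, List.contains_nil, PySem.Dict.get?_mk_cons]
  split_ifs <;> simp_all [PySem.Dict.get?, @eq_comm String]

theorem pvMem3 (s : String) :
    (["help_support", "account_management"] : List String).contains s
      = (pvDLit.get? s == some 2) := by
  simp only [pvDLit, List.contains_cons, List.contains_nil, PySem.Dict.get?_mk_cons]
  split_ifs <;> simp_all [PySem.Dict.get?, @eq_comm String]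

-- every lookup result is none or one of the three group indices
theorem pvLookupRange (s : String) :
    pvDLit.get? s = none ∨ pvDLit.get? s = some 0 ∨ pvDLit.get? s = some 1 ∨
      pvDLit.get? s = some 2 := by
  simp only [pvDLit, PySem.Dict.get?_mk_cons]
  split_ifs <;> simp [PySem.Dict.get?]

-- ===== VERDICT (by name: the statement is the Claim_ definition above) =====
theorem are_related_intents_py_spec : Claim_equal_are_related_intents_py := by
  intro intent1 intent2 _
  unfold Spec_are_related_intents_py
  unfold are_related_intents_py are_related_intents_py_alt pvRelatedGroups
  rw [pvIntentToGroup_eq]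
  simp only [pvLoopA, pvMem1, pvMem2, pvMem3]
  rcases pvLookupRange intent1 with h1 | h1 | h1 | h1 <;>
    rcases pvLookupRange intent2 with h2 | h2 | h2 | h2 <;>
      simp [h1, h2]
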